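-- pv_equiv track=rewrite | github.com/VCMason/PyGenToolbox | src/pygentoolbox/AnnotateIntrons.py | create_intron_annotations
-- ===== SOURCE A (Python) =====
-- def create_intron_annotations(dexons, ids):
--     # input is dictionary, key is transctipt ID
--     # value is list of exon lines from gff3 file for mRNA with two or more exons
--     # exon should be written as CDS
--     introns = []
--     exonsandintrons = []
--     for id in ids:
--         for count, exon in enumerate(dexons[id]):
--             if count == 0:
--                 intronstart = int(exon[4]) + 1  # start of introns is one base passed the end of previous exon
--                 exonsandintrons.append('\t'.join(exon))
--             elif count >= 1:
--                 intronend = int(exon[3]) - 1  # end of intron is one base before the start of next exon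
--                 metadata = exon[8].split(';')
--                 #intronid = 'ID=' + '.'.join(id.split('.')[:-1] + ['I' + id.split('.')[-1][1:]])
--                 for data in metadata:
--                     if data[:len('ID=')] == 'ID=':
--                         intronid = '.'.join(data.split('.')[:3] + ['I' + data.split('.')[3][1:].split(':')[0] + f':{intronstart}..{intronend}'])  # data.split('.')[3][1:]] + data.split('.')[4:]
--                     if data[:len('Name=')] == 'Name=':
--                         intronname = '.'.join(data.split('.')[:3] + ['I' + data.split('.')[3][1:].split(':')[0] + f':{intronstart}..{intronend}'])  # data.split('.')[4:]
--                     if data[:len('Parent=')] == 'Parent=':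
--                         parent = data
--                 intron = exon[:2] + ['intron', str(intronstart), str(intronend)] + exon[5:8] + [';'.join([intronid, intronname, parent])]
--                 introns.append('\t'.join(intron))
--                 exonsandintrons.append('\t'.join(intron))
--                 exonsandintrons.append('\t'.join(exon))
--                 intronstart = int(exon[4]) + 1  # start of introns is one base passed the end of previous exon
--
--     return introns, exonsandintrons
-- ===== SOURCE B (Python) =====
-- def _rename(data, istart, iend):
--     parts = data.split('.')
--     return '.'.join(parts[:3] + ['I' + parts[3][1:].split(':')[0] + f':{istart}..{iend}'])
--
--
-- def _last_field(metadata, prefix):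
--     # the original keeps overwriting, i.e. the LAST matching field wins
--     return next(d for d in reversed(metadata) if d.startswith(prefix))
--
--
-- def _intron_line(prev, cur):
--     istart = int(prev[4]) + 1
--     iend = int(cur[3]) - 1
--     md = cur[8].split(';')
--     meta = ';'.join([_rename(_last_field(md, 'ID='), istart, iend),
--                      _rename(_last_field(md, 'Name='), istart, iend),
--                      _last_field(md, 'Parent=')])
--     return '\t'.join(cur[:2] + ['intron', str(istart), str(iend)] + cur[5:8] + [meta])
--
--
-- def create_intron_annotations(dexons, ids):
--     introns = []
--     exonsandintrons = []
--     for id in ids: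
--         exons = dexons[id]
--         exlines = ['\t'.join(e) for e in exons]
--         inlines = [_intron_line(exons[i], exons[i + 1]) for i in range(len(exons) - 1)]
--         # interleave positionally: exon lines in the even slots, intron lines in the odd slots
--         chunk = [None] * (len(exlines) + len(inlines))
--         chunk[::2] = exlines
--         chunk[1::2] = inlines
--         introns += inlines
--         exonsandintrons += chunk
--     return introns, exonsandintrons
-- ===== Notes on version B (the rewrite author's own statement) =====
-- stated objective: alternative
-- what changed: A interleaves introns into both output lists in one stateful pass (enumerate with a count==0/>=1 branch and locals intronstart/intronid/intronname/parent carried across iterations); B instead builds per transcript two independent lists by comprehension (exon lines, intron lines with last-matching metadata found by reversed search) and merges them positionally by slice assignment (even slots = exon lines, odd slots = intron lines), taking introns directly as the second list.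
import Mathlib
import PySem

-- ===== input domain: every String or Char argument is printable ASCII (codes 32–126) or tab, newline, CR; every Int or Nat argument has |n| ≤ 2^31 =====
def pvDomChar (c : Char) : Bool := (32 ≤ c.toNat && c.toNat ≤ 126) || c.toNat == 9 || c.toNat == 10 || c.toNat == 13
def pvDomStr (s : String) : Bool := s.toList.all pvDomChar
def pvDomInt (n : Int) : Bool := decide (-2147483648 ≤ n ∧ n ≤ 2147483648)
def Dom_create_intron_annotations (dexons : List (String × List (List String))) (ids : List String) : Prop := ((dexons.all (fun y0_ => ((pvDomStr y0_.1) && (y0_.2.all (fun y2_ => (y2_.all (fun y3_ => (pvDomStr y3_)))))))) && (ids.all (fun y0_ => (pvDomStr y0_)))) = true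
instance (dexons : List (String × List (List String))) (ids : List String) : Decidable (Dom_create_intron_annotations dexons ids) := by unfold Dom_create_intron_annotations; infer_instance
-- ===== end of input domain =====

-- B replaces A's single stateful interleaving pass (enumerate with count branching and loop-carried
-- locals) by staged passes per transcript: an exon-line list and an intron-line list built
-- independently (metadata by last-match reversed search), merged positionally (even/odd slots);
-- objective: alternative (same cost, different construction).

-- ===== PORT A =====
-- intronid/intronname expression of A: '.'.join(data.split('.')[:3] + ['I' + data.split('.')[3][1:].split(':')[0] + f':{istart}..{iend}'])
def pvRenameA (data : String) (istart iend : Int) : String :=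
  PySem.Str.join "." (PySem.List.slice ((PySem.Str.split? data ".").getD []) none (some 3) ++
    [PySem.Str.join "" ["I",
      PySem.List.pyGetD ((PySem.Str.split? (PySem.Str.slice (PySem.List.pyGetD ((PySem.Str.split? data ".").getD []) 3 "") (some 1) none) ":").getD []) 0 "",
      ":", PySem.Int.toStr istart, "..", PySem.Int.toStr iend]])

-- the body of A's 'for data in metadata' loop (three independent ifs; data[:len('ID=')] == 'ID=' etc.)
def pvStepMetaA (istart iend : Int) (t : Option String × Option String × Option String) (data : String) :
    Option String × Option String × Option String :=
  let t := if PySem.Str.slice data none (some 3) == "ID=" then (some (pvRenameA data istart iend), t.2.1, t.2.2) else t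
  let t := if PySem.Str.slice data none (some 5) == "Name=" then (t.1, some (pvRenameA data istart iend), t.2.2) else t
  if PySem.Str.slice data none (some 7) == "Parent=" then (t.1, t.2.1, some data) else t

-- the body of A's 'for count, exon in enumerate(...)' loop; state = (introns, exonsandintrons,
-- intronstart, intronid?, intronname?, parent?) — the last four are Python locals carried across iterations
def pvStepA (st : List String × List String × Int × Option String × Option String × Option String)
    (ce : Int × List String) : List String × List String × Int × Option String × Option String × Option String :=
  let (introns, eai, istart, o1, o2, o3) := st
  let count := ce.1; let exon := ce.2
  if count == 0 then
    (introns, eai ++ [PySem.Str.join "\t" exon],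
     (PySem.Int.ofStr? (PySem.List.pyGetD exon 4 "")).getD 0 + 1, o1, o2, o3)
  else if 1 ≤ count then
    let intronend := (PySem.Int.ofStr? (PySem.List.pyGetD exon 3 "")).getD 0 - 1
    let metadata := (PySem.Str.split? (PySem.List.pyGetD exon 8 "") ";").getD []
    let t := metadata.foldl (pvStepMetaA istart intronend) (o1, o2, o3)
    let intron := PySem.List.slice exon none (some 2) ++ ["intron", PySem.Int.toStr istart, PySem.Int.toStr intronend] ++
      PySem.List.slice exon (some 5) (some 8) ++ [PySem.Str.join ";" [t.1.getD "", t.2.1.getD "", t.2.2.getD ""]]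
    (introns ++ [PySem.Str.join "\t" intron], eai ++ [PySem.Str.join "\t" intron, PySem.Str.join "\t" exon],
     (PySem.Int.ofStr? (PySem.List.pyGetD exon 4 "")).getD 0 + 1, t.1, t.2.1, t.2.2)
  else st

def pvOuterA (dexons : List (String × List (List String)))
    (st : List String × List String × Int × Option String × Option String × Option String) (id : String) :
    List String × List String × Int × Option String × Option String × Option String :=
  (PySem.List.enumerate (((PySem.Dict.mk dexons).get? id).getD []) 0).foldl pvStepA st

def create_intron_annotations (dexons : List (String × List (List String))) (ids : List String) :
    List String × List String :=
  let fin := ids.foldl (pvOuterA dexons) ([], [], 0, none, none, none)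
  (fin.1, fin.2.1)

-- ===== PORT B =====
def pvRenameB (data : String) (istart iend : Int) : String :=
  let parts := (PySem.Str.split? data ".").getD []
  PySem.Str.join "." (PySem.List.slice parts none (some 3) ++
    [PySem.Str.join "" ["I",
      PySem.List.pyGetD ((PySem.Str.split? (PySem.Str.slice (PySem.List.pyGetD parts 3 "") (some 1) none) ":").getD []) 0 "",
      ":", PySem.Int.toStr istart, "..", PySem.Int.toStr iend]])

-- _last_field: next(d for d in reversed(metadata) if d.startswith(prefix))
-- (next raises StopIteration when no field matches — outside Pre_; the .getD "" is never reached there)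
def pvLastMeta (md : List String) (p : String) : String :=
  (md.reverse.find? (fun d => PySem.Str.startswith d p)).getD ""

def pvIntronLineB (prev cur : List String) : String :=
  let istart := (PySem.Int.ofStr? (PySem.List.pyGetD prev 4 "")).getD 0 + 1
  let iend := (PySem.Int.ofStr? (PySem.List.pyGetD cur 3 "")).getD 0 - 1
  let md := (PySem.Str.split? (PySem.List.pyGetD cur 8 "") ";").getD []
  let metastr := PySem.Str.join ";" [pvRenameB (pvLastMeta md "ID=") istart iend,
    pvRenameB (pvLastMeta md "Name=") istart iend, pvLastMeta md "Parent="]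
  PySem.Str.join "\t" (PySem.List.slice cur none (some 2) ++ ["intron", PySem.Int.toStr istart, PySem.Int.toStr iend] ++
    PySem.List.slice cur (some 5) (some 8) ++ [metastr])

-- the positional merge: chunk = [None]*(len(ex)+len(il)); chunk[::2] = ex; chunk[1::2] = il
-- rendered slot by slot: slot j holds ex[j/2] for even j, il[j/2] for odd j
def pvInterleave (ex il : List String) : List String :=
  (List.range (ex.length + il.length)).map
    (fun j => if j % 2 == 0 then ex.getD (j / 2) "" else il.getD (j / 2) "")

-- body of B's 'for id in ids' loop
def pvChunkB (dexons : List (String × List (List String))) (acc : List String × List String) (id : String) :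
    List String × List String :=
  let exons := ((PySem.Dict.mk dexons).get? id).getD []
  let exlines := exons.map (fun e => PySem.Str.join "\t" e)
  let inlines := (List.range (exons.length - 1)).map
    (fun i => pvIntronLineB (exons.getD i []) (exons.getD (i + 1) []))
  (acc.1 ++ inlines, acc.2 ++ pvInterleave exlines inlines)

def create_intron_annotations_alt (dexons : List (String × List (List String))) (ids : List String) :
    List String × List String :=
  ids.foldl (pvChunkB dexons) ([], [])

-- ===== PRECONDITION & SPEC =====
-- the first exon's field 4 exists and parses as an int (int(exon[4]) succeeds)
def pvOkFirst (e : List String) : Bool := (PySem.Int.ofStr? (PySem.List.pyGetD e 4 "")).isSome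

-- a non-first exon: fields 3/4 parse as ints, field 8 exists, its ';'-metadata has an ID=, a Name= and a
-- Parent= entry, and every ID=/Name= entry has at least 4 '.'-separated parts
def pvOkLater (e : List String) : Bool :=
  (PySem.Int.ofStr? (PySem.List.pyGetD e 3 "")).isSome && (PySem.Int.ofStr? (PySem.List.pyGetD e 4 "")).isSome &&
  decide (9 ≤ e.length) &&
  (let md := (PySem.Str.split? (PySem.List.pyGetD e 8 "") ";").getD []
   md.any (fun d => PySem.Str.startswith d "ID=") && md.any (fun d => PySem.Str.startswith d "Name=") &&
   md.any (fun d => PySem.Str.startswith d "Parent=") &&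
   md.all (fun d => !(PySem.Str.startswith d "ID=" || PySem.Str.startswith d "Name=") ||
                    decide (4 ≤ ((PySem.Str.split? d ".").getD []).length)))

def pvOkExons : List (List String) → Bool
  | [] => true
  | e :: rest => pvOkFirst e && rest.all pvOkLater

-- Pre_ excludes inputs on which A raises (missing id, missing/unparsable coordinate fields, an ID=/Name=
-- entry with fewer than four '.'-parts, metadata fields absent on the FIRST non-first exon), and also the
-- inputs where a later exon's metadata lacks an ID=/Name=/Parent= entry that an earlier exon supplied, on
-- which A silently reuses the stale value of a loop-carried local while B raises StopIteration.
def Pre_create_intron_annotations (dexons : List (String × List (List String))) (ids : List String) : Prop :=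
  (ids.all (fun id => match (PySem.Dict.mk dexons).get? id with
    | none => false
    | some ex => pvOkExons ex)) = true
instance (dexons : List (String × List (List String))) (ids : List String) : Decidable (Pre_create_intron_annotations dexons ids) := by unfold Pre_create_intron_annotations; infer_instance

def pvWitness_create_intron_annotations : (List (String × List (List String))) × List String :=
  ([("t1", [["c","s","exon","1","10",".","+","0","ID=a.b.c.E1:1..10;Name=a.b.c.E1;Parent=t1"],
            ["c","s","exon","21","30",".","+","0","ID=a.b.c.E2:21..30;Name=a.b.c.E2;Parent=t1"]])], ["t1"])

def Spec_create_intron_annotations (dexons : List (String × List (List String))) (ids : List String) (out : List String × List String) : Prop := out = create_intron_annotations_alt dexons ids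
instance (dexons : List (String × List (List String))) (ids : List String) (out : List String × List String) : Decidable (Spec_create_intron_annotations dexons ids out) := by unfold Spec_create_intron_annotations; infer_instance

-- ===== CLAIM (what is proved, stated in full; the proofs are below) =====
def Claim_equal_create_intron_annotations : Prop := ∀ (dexons : List (String × List (List String))) (ids : List String), Dom_create_intron_annotations dexons ids → Pre_create_intron_annotations dexons ids → Spec_create_intron_annotations dexons ids (create_intron_annotations dexons ids)

-- ===== LEMMAS AND PROOFS =====
theorem pv_prefix_eq (data p : String) (k : Nat) (hk : p.toList.length = k) :
    (PySem.Str.slice data none (some (k:Int)) == p) = PySem.Str.startswith data p := by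
  rw [Bool.eq_iff_iff, beq_iff_eq, ← String.toList_inj]
  rw [show (PySem.Str.slice data none (some (k:Int))).toList = data.toList.take k from by
    simp [pysem, PySem.List.slice_to_natCast]]
  rw [show PySem.Str.startswith data p = PySem.Chars.startswith data.toList p.toList from by simp [pysem]]
  rw [PySem.Chars.startswith, List.isPrefixOf_iff_prefix]
  constructor
  · intro h; rw [← h]; exact List.take_prefix k data.toList
  · intro h; rw [List.prefix_iff_eq_take.mp h, hk]

theorem pvRename_eq : pvRenameA = pvRenameB := rfl

theorem pv_prefix_id (data : String) :
    (PySem.Str.slice data none (some 3) == "ID=") = PySem.Str.startswith data "ID=" := by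
  simpa using pv_prefix_eq data "ID=" 3 rfl

theorem pv_prefix_name (data : String) :
    (PySem.Str.slice data none (some 5) == "Name=") = PySem.Str.startswith data "Name=" := by
  simpa using pv_prefix_eq data "Name=" 5 rfl

theorem pv_prefix_parent (data : String) :
    (PySem.Str.slice data none (some 7) == "Parent=") = PySem.Str.startswith data "Parent=" := by
  simpa using pv_prefix_eq data "Parent=" 7 rfl

-- startswith form of A's metadata step
def pvStepMetaS (istart iend : Int) (t : Option String × Option String × Option String) (data : String) :
    Option String × Option String × Option String :=
  let t := if PySem.Str.startswith data "ID=" then (some (pvRenameA data istart iend), t.2.1, t.2.2) else t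
  let t := if PySem.Str.startswith data "Name=" then (t.1, some (pvRenameA data istart iend), t.2.2) else t
  if PySem.Str.startswith data "Parent=" then (t.1, t.2.1, some data) else t

theorem pvStepMeta_eq (istart iend : Int) : pvStepMetaA istart iend = pvStepMetaS istart iend := by
  funext t data
  unfold pvStepMetaA pvStepMetaS
  rw [pv_prefix_id data, pv_prefix_name data, pv_prefix_parent data]

theorem pv_foldl_last_set {α β : Type} (p : α → Bool) (v : α → β) (ds : List α) :
    ∀ (t : Option β), ds.foldl (fun o d => if p d then some (v d) else o) t =
      match ds.reverse.find? p with | some d => some (v d) | none => t := by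
  induction ds with
  | nil => intro t; rfl
  | cons d ds ih =>
    intro t
    simp only [List.foldl_cons, List.reverse_cons, List.find?_append, ih]
    cases hf : ds.reverse.find? p with
    | some x => rfl
    | none => cases hp : p d <;> simp [List.find?, hp]

theorem pvStepMetaS_components (istart iend : Int) (t : Option String × Option String × Option String) (data : String) :
    pvStepMetaS istart iend t data =
      ((if PySem.Str.startswith data "ID=" then some (pvRenameA data istart iend) else t.1),
       (if PySem.Str.startswith data "Name=" then some (pvRenameA data istart iend) else t.2.1),
       (if PySem.Str.startswith data "Parent=" then some data else t.2.2)) := by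
  unfold pvStepMetaS
  split_ifs <;> rfl

theorem pv_foldl_metaS (istart iend : Int) (ds : List String) :
    ∀ (t : Option String × Option String × Option String),
    ds.foldl (pvStepMetaS istart iend) t =
      (ds.foldl (fun o d => if PySem.Str.startswith d "ID=" then some (pvRenameA d istart iend) else o) t.1,
       ds.foldl (fun o d => if PySem.Str.startswith d "Name=" then some (pvRenameA d istart iend) else o) t.2.1,
       ds.foldl (fun o d => if PySem.Str.startswith d "Parent=" then some d else o) t.2.2) := by
  induction ds with
  | nil => intro t; rfl
  | cons d ds ih =>
    intro t
    simp only [List.foldl_cons, ih, pvStepMetaS_components]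

theorem pv_find_of_any {α : Type} (p : α → Bool) (ds : List α) (h : ds.any p = true) :
    ∃ d, ds.reverse.find? p = some d := by
  have : (ds.reverse.find? p).isSome = true := by
    rw [List.find?_isSome]
    simp only [List.any_eq_true] at h
    obtain ⟨x, hx, hpx⟩ := h
    exact ⟨x, List.mem_reverse.mpr hx, hpx⟩
  exact Option.isSome_iff_exists.mp this

-- A's metadata fold, under presence of all three fields, computes exactly B's last-match values
theorem pv_metaFold_result (istart iend : Int) (ds : List String)
    (hid : ds.any (fun d => PySem.Str.startswith d "ID=") = true)
    (hname : ds.any (fun d => PySem.Str.startswith d "Name=") = true)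
    (hpar : ds.any (fun d => PySem.Str.startswith d "Parent=") = true)
    (t : Option String × Option String × Option String) :
    ds.foldl (pvStepMetaA istart iend) t =
      (some (pvRenameA (pvLastMeta ds "ID=") istart iend),
       some (pvRenameA (pvLastMeta ds "Name=") istart iend),
       some (pvLastMeta ds "Parent=")) := by
  obtain ⟨d1, h1⟩ := pv_find_of_any _ ds hid
  obtain ⟨d2, h2⟩ := pv_find_of_any _ ds hname
  obtain ⟨d3, h3⟩ := pv_find_of_any _ ds hpar
  rw [pvStepMeta_eq, pv_foldl_metaS, pv_foldl_last_set, pv_foldl_last_set, pv_foldl_last_set,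
      h1, h2, h3]
  unfold pvLastMeta
  rw [h1, h2, h3]
  rfl

def pvIstart (e : List String) : Int := (PySem.Int.ofStr? (PySem.List.pyGetD e 4 "")).getD 0 + 1

theorem pvStepA_elif (k : Int) (hk : 1 ≤ k) (prev cur : List String)
    (I E : List String) (o1 o2 o3 : Option String) (h : pvOkLater cur = true) :
    ∃ p1 p2 p3, pvStepA (I, E, pvIstart prev, o1, o2, o3) (k, cur) =
      (I ++ [pvIntronLineB prev cur],
       E ++ [pvIntronLineB prev cur, PySem.Str.join "\t" cur], pvIstart cur, p1, p2, p3) := by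
  have hk0 : (k == 0) = false := by simp; omega
  unfold pvOkLater at h
  simp only [Bool.and_eq_true] at h
  obtain ⟨⟨⟨h3, h4⟩, h9⟩, ⟨⟨hid, hname⟩, hpar⟩, -⟩ := h
  set istart := pvIstart prev with histart
  set iend := (PySem.Int.ofStr? (PySem.List.pyGetD cur 3 "")).getD 0 - 1 with hiend
  set md := (PySem.Str.split? (PySem.List.pyGetD cur 8 "") ";").getD [] with hmd
  refine ⟨some (pvRenameA (pvLastMeta md "ID=") istart iend),
          some (pvRenameA (pvLastMeta md "Name=") istart iend),
          some (pvLastMeta md "Parent="), ?_⟩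
  unfold pvStepA
  simp only [hk0, Bool.false_eq_true, if_false, if_pos hk]
  rw [show (PySem.Str.split? (PySem.List.pyGetD cur 8 "") ";").getD [] = md from rfl,
      pv_metaFold_result istart _ md hid hname hpar]
  unfold pvIntronLineB pvIstart
  rw [pvRename_eq]
  rfl

def pvLines (prev : List String) : List (List String) → List String
  | [] => []
  | cur :: rest => pvIntronLineB prev cur :: pvLines cur rest

def pvInter (prev : List String) : List (List String) → List String
  | [] => []
  | cur :: rest => pvIntronLineB prev cur :: PySem.Str.join "\t" cur :: pvInter cur rest

def pvIdLines : List (List String) → List String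
  | [] => []
  | e0 :: rest => pvLines e0 rest

def pvIdInter : List (List String) → List String
  | [] => []
  | e0 :: rest => PySem.Str.join "\t" e0 :: pvInter e0 rest

def pvAllL (dexons : List (String × List (List String))) : List String → List String
  | [] => []
  | id :: ids => pvIdLines (((PySem.Dict.mk dexons).get? id).getD []) ++ pvAllL dexons ids

def pvAllT (dexons : List (String × List (List String))) : List String → List String
  | [] => []
  | id :: ids => pvIdInter (((PySem.Dict.mk dexons).get? id).getD []) ++ pvAllT dexons ids

theorem pvInnerA (rest : List (List String)) :
    ∀ (prev : List String) (k : Int), 1 ≤ k → rest.all pvOkLater = true →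
    ∀ (I E : List String) (o1 o2 o3 : Option String), ∃ n p1 p2 p3,
      (PySem.List.enumerate rest k).foldl pvStepA (I, E, pvIstart prev, o1, o2, o3) =
        (I ++ pvLines prev rest, E ++ pvInter prev rest, n, p1, p2, p3) := by
  induction rest with
  | nil =>
    intro prev k hk _ I E o1 o2 o3
    exact ⟨pvIstart prev, o1, o2, o3, by simp [PySem.List.enumerate, pvLines, pvInter]⟩
  | cons cur rest ih =>
    intro prev k hk hall I E o1 o2 o3
    simp only [List.all_cons, Bool.and_eq_true] at hall
    obtain ⟨hcur, hrest⟩ := hall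
    rw [PySem.List.enumerate_cons, List.foldl_cons]
    obtain ⟨p1, p2, p3, hstep⟩ := pvStepA_elif k hk prev cur I E o1 o2 o3 hcur
    rw [hstep]
    obtain ⟨n', q1, q2, q3, hrec⟩ := ih cur (k + 1) (by omega) hrest
      (I ++ [pvIntronLineB prev cur]) (E ++ [pvIntronLineB prev cur, PySem.Str.join "\t" cur]) p1 p2 p3
    refine ⟨n', q1, q2, q3, ?_⟩
    rw [hrec, pvLines, pvInter]
    simp

theorem pvOuterA_spec (dexons : List (String × List (List String))) (ids : List String) :
    (ids.all (fun id => match (PySem.Dict.mk dexons).get? id with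
      | none => false | some ex => pvOkExons ex)) = true →
    ∀ (I E : List String) (n : Int) (o1 o2 o3 : Option String), ∃ n' p1 p2 p3,
      ids.foldl (pvOuterA dexons) (I, E, n, o1, o2, o3) =
        (I ++ pvAllL dexons ids, E ++ pvAllT dexons ids, n', p1, p2, p3) := by
  induction ids with
  | nil =>
    intro _ I E n o1 o2 o3
    exact ⟨n, o1, o2, o3, by simp [pvAllL, pvAllT]⟩
  | cons id ids ih =>
    intro hpre I E n o1 o2 o3
    simp only [List.all_cons, Bool.and_eq_true] at hpre
    obtain ⟨hhead, htail⟩ := hpre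
    rw [List.foldl_cons]
    have hrw : pvOuterA dexons (I, E, n, o1, o2, o3) id =
        (PySem.List.enumerate (((PySem.Dict.mk dexons).get? id).getD []) 0).foldl pvStepA
          (I, E, n, o1, o2, o3) := rfl
    cases hget : (PySem.Dict.mk dexons).get? id with
    | none => rw [hget] at hhead; simp at hhead
    | some ex =>
      rw [hget] at hhead
      rw [hget, Option.getD_some] at hrw
      rw [hrw]
      cases ex with
      | nil =>
        obtain ⟨n', p1, p2, p3, hrec⟩ := ih htail I E n o1 o2 o3
        refine ⟨n', p1, p2, p3, ?_⟩
        rw [show PySem.List.enumerate ([] : List (List String)) 0 = [] from rfl, List.foldl_nil, hrec,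
            pvAllL, pvAllT, hget]
        simp [pvIdLines, pvIdInter]
      | cons e0 rest =>
        have hrest : rest.all pvOkLater = true := by
          unfold pvOkExons at hhead
          exact ((Bool.and_eq_true _ _).mp hhead).2
        rw [PySem.List.enumerate_cons, List.foldl_cons]
        have hstep0 : pvStepA (I, E, n, o1, o2, o3) (0, e0) =
            (I, E ++ [PySem.Str.join "\t" e0], pvIstart e0, o1, o2, o3) := rfl
        rw [hstep0, show (0 : Int) + 1 = 1 from rfl]
        obtain ⟨n1, p1, p2, p3, hin⟩ := pvInnerA rest e0 1 (by omega) hrest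
          I (E ++ [PySem.Str.join "\t" e0]) o1 o2 o3
        rw [hin]
        obtain ⟨n2, q1, q2, q3, htl⟩ := ih htail (I ++ pvLines e0 rest)
          (E ++ [PySem.Str.join "\t" e0] ++ pvInter e0 rest) n1 p1 p2 p3
        refine ⟨n2, q1, q2, q3, ?_⟩
        rw [htl, pvAllL, pvAllT, hget]
        simp [pvIdLines, pvIdInter]

-- ===== B-side lemmas =====
theorem pvInterleave_cons (a b : String) (ex il : List String) :
    pvInterleave (a :: ex) (b :: il) = a :: b :: pvInterleave ex il := by
  unfold pvInterleave
  have hlen : (a :: ex).length + (b :: il).length = (ex.length + il.length) + 1 + 1 := by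
    simp; omega
  rw [hlen, List.range_succ_eq_map, List.range_succ_eq_map]
  simp only [List.map_cons, List.map_map]
  refine congrArg₂ _ rfl (congrArg₂ _ rfl ?_)
  apply List.map_congr_left
  intro k _
  simp only [Function.comp_apply, Nat.succ_eq_add_one]
  have h2 : (k + 1 + 1) % 2 = k % 2 := by omega
  have h3 : (k + 1 + 1) / 2 = k / 2 + 1 := by omega
  rw [h2, h3]
  cases hk : k % 2 == 0 <;> simp

theorem pvInlines_eq (rest : List (List String)) : ∀ (e0 : List String),
    (List.range ((e0 :: rest).length - 1)).map
      (fun i => pvIntronLineB ((e0 :: rest).getD i []) ((e0 :: rest).getD (i + 1) [])) =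
    pvLines e0 rest := by
  induction rest with
  | nil => intro e0; rfl
  | cons cur t ih =>
    intro e0
    have hlen : (e0 :: cur :: t).length - 1 = ((cur :: t).length - 1) + 1 := by simp
    rw [hlen, List.range_succ_eq_map, List.map_cons, List.map_map, pvLines]
    refine congrArg₂ _ rfl ?_
    rw [← ih cur]
    apply List.map_congr_left
    intro k _
    simp [Function.comp_apply]

theorem pvChunk_eq (rest : List (List String)) : ∀ (e0 : List String),
    pvInterleave ((e0 :: rest).map (fun e => PySem.Str.join "\t" e)) (pvLines e0 rest) =
      PySem.Str.join "\t" e0 :: pvInter e0 rest := by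
  induction rest with
  | nil => intro e0; rfl
  | cons cur t ih =>
    intro e0
    rw [List.map_cons, pvLines, pvInterleave_cons, pvInter, ih cur]

theorem pvOuterB_spec (dexons : List (String × List (List String))) (ids : List String) :
    ∀ (I E : List String),
      ids.foldl (pvChunkB dexons) (I, E) = (I ++ pvAllL dexons ids, E ++ pvAllT dexons ids) := by
  induction ids with
  | nil => intro I E; simp [pvAllL, pvAllT]
  | cons id ids ih =>
    intro I E
    simp only [List.foldl_cons]
    rw [show pvChunkB dexons (I, E) id =
      (I ++ pvIdLines (((PySem.Dict.mk dexons).get? id).getD []),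
       E ++ pvIdInter (((PySem.Dict.mk dexons).get? id).getD [])) from ?_]
    · rw [ih, pvAllL, pvAllT]; simp
    · unfold pvChunkB
      cases hx : ((PySem.Dict.mk dexons).get? id).getD [] with
      | nil => simp [pvIdLines, pvIdInter, pvInterleave]
      | cons e0 rest =>
        simp only [pvIdLines, pvIdInter, pvInlines_eq, pvChunk_eq]

-- ===== VERDICT (by name: the statement is the Claim_ definition above) =====
theorem create_intron_annotations_spec : Claim_equal_create_intron_annotations := by
  intro dexons ids _ hpre
  unfold Spec_create_intron_annotations create_intron_annotations create_intron_annotations_alt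
  obtain ⟨n', p1, p2, p3, hA⟩ := pvOuterA_spec dexons ids hpre [] [] 0 none none none
  rw [hA, pvOuterB_spec dexons ids]
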